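-- pv_equiv track=rewrite | github.com/ftmzhrasafaei/msa_clustal | msa.py | ColPoint
-- ===== SOURCE A (Python) =====
-- def ColPoint(col , match , mismatch , gap):
--     p = 0
--     for i in range(len(col)):
--         for j in range(i+1 , len(col)):
--             if col[i] == '-':
--                 if col[j] != '-':
--                     p = p + gap
--             if col[j] == '-':
--                 if col[i] != '-':
--                     p = p + gap
--             if col[i] != '-' and col[j] != '-':
--                 if col[i] == col[j]:
--                     p = p  + match
--                 if col[i] != col[j]:
--                     p = p + mismatch
--     return p
-- ===== SOURCE B (Python) =====
-- def ColPoint(col , match , mismatch , gap):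
--     # O(n): count frequencies once, then use pair-counting arithmetic instead of the O(n^2) double loop.
--     from collections import Counter
--     cnt = Counter(col)
--     g = cnt.get('-', 0)
--     ng = len(col) - g
--     same2 = sum(cnt[x] - 1 for x in col if x != '-')  # each equal non-gap pair counted twice
--     same = same2 // 2
--     pairs = ng * (ng - 1) // 2
--     return gap * g * ng + match * same + mismatch * (pairs - same)
-- ===== Notes on version B (the rewrite author's own statement) =====
-- stated objective: faster
-- what changed: Replaced A's O(n^2) double loop over all index pairs by a single O(n) pass: build a Counter of the column once, then compute the gap, match and mismatch pair counts arithmetically (mixed pairs = gaps*nongaps, equal pairs from per-symbol counts, mismatch pairs as the remainder).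
import Mathlib
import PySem

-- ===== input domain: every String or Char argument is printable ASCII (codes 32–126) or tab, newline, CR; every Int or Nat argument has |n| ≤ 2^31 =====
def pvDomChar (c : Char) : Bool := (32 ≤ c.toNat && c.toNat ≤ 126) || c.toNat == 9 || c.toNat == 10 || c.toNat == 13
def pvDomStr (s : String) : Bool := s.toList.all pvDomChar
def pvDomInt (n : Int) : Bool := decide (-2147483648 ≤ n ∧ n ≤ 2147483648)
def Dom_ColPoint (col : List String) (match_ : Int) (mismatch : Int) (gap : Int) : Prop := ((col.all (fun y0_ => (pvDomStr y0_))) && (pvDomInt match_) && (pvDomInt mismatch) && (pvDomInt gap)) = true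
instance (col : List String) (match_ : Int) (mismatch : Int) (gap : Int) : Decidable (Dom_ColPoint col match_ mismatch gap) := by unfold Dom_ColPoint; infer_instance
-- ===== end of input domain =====

-- B replaces A's O(n^2) double loop over pairs by one O(n) pass: count frequencies once
-- (Counter) and obtain the gap/match/mismatch pair counts arithmetically.

-- ===== PORT A =====
-- the body of A's inner loop: the four 'if' statements, in A's order
def ColPointStep (match_ mismatch gap p : Int) (ci cj : String) : Int :=
  let p1 := if ci = "-" then (if cj ≠ "-" then p + gap else p) else p
  let p2 := if cj = "-" then (if ci ≠ "-" then p1 + gap else p1) else p1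
  if ci ≠ "-" ∧ cj ≠ "-" then
    let p3 := if ci = cj then p2 + match_ else p2
    if ci ≠ cj then p3 + mismatch else p3
  else p2

-- A's inner loop 'for j in range(i+1, len(col))'
def ColPointInner (match_ mismatch gap : Int) (col : List String) (p i : Int) : Int :=
  (PySem.List.pyRange (i + 1) (PySem.List.len col) 1).foldl
    (fun q j => ColPointStep match_ mismatch gap q
      (PySem.List.pyGetD col i "") (PySem.List.pyGetD col j "")) p

def ColPoint (col : List String) (match_ : Int) (mismatch : Int) (gap : Int) : Int :=
  (PySem.List.pyRange 0 (PySem.List.len col) 1).foldl (ColPointInner match_ mismatch gap col) 0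

-- ===== PORT B =====
def ColPoint_alt (col : List String) (match_ : Int) (mismatch : Int) (gap : Int) : Int :=
  let cnt := PySem.Dict.counter col
  let g := cnt.getD "-" 0
  let ng := PySem.List.len col - g
  let same2 := col.foldl (fun acc x => if x ≠ "-" then acc + (cnt.getD x 0 - 1) else acc) 0
  let same := PySem.Int.floordiv same2 2
  let pairs := PySem.Int.floordiv (ng * (ng - 1)) 2
  gap * g * ng + match_ * same + mismatch * (pairs - same)

-- ===== PRECONDITION & SPEC =====
def Spec_ColPoint (col : List String) (match_ : Int) (mismatch : Int) (gap : Int) (out : Int) : Prop := out = ColPoint_alt col match_ mismatch gap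
instance (col : List String) (match_ : Int) (mismatch : Int) (gap : Int) (out : Int) : Decidable (Spec_ColPoint col match_ mismatch gap out) := by unfold Spec_ColPoint; infer_instance

-- ===== CLAIM (what is proved, stated in full; the proofs are below) =====
def Claim_equal_ColPoint : Prop := ∀ (col : List String) (match_ : Int) (mismatch : Int) (gap : Int), Dom_ColPoint col match_ mismatch gap → Spec_ColPoint col match_ mismatch gap (ColPoint col match_ mismatch gap)

-- ===== LEMMAS AND PROOFS =====

-- the net contribution of one pair (A's four ifs collapsed)
def pvScore (match_ mismatch gap : Int) (x y : String) : Int :=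
  if x = "-" then (if y = "-" then 0 else gap)
  else if y = "-" then gap
  else if x = y then match_ else mismatch

-- number of equal non-gap pairs, head-pairs-with-tail recursion
def pvS : List String → Int
  | [] => 0
  | x :: t => (if x = "-" then 0 else (t.count x : Int)) + pvS t

-- sum-of-pairs score, head-pairs-with-tail recursion
def pvPair (match_ mismatch gap : Int) : List String → Int
  | [] => 0
  | x :: t => ((t.map (pvScore match_ mismatch gap x)).sum) + pvPair match_ mismatch gap t

def pvChoose2 (c : Int) : Int := c * (c - 1) / 2

theorem pvStep_eq (match_ mismatch gap p : Int) (x y : String) :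
    ColPointStep match_ mismatch gap p x y = p + pvScore match_ mismatch gap x y := by
  unfold ColPointStep pvScore
  by_cases hx : x = "-" <;> by_cases hy : y = "-" <;> by_cases hxy : x = y <;> simp_all

theorem pvGetD_cons (x : String) (t : List String) (d : String) (i : Int) (hi : 0 ≤ i) :
    PySem.List.pyGetD (x :: t) (i + 1) d = PySem.List.pyGetD t i d := by
  obtain ⟨n, rfl⟩ := Int.eq_ofNat_of_zero_le hi
  have h : ((n : Int) + 1) = ((n + 1 : ℕ) : Int) := by push_cast; ring
  rw [h, PySem.List.pyGetD_natCast, PySem.List.pyGetD_natCast]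
  rfl

theorem pvInner_shift (match_ mismatch gap : Int) (x : String) (t : List String)
    (p : Int) (k : Int) (hk : 0 ≤ k) :
    ColPointInner match_ mismatch gap (x :: t) p (k + 1)
      = ColPointInner match_ mismatch gap t p k := by
  unfold ColPointInner
  have hlen : PySem.List.len (x :: t) = PySem.List.len t + 1 := by
    simp [PySem.List.len_eq]
  rw [hlen]
  rw [PySem.List.pyRange_one, PySem.List.pyRange_one]
  have harg : (PySem.List.len t + 1 - (k + 1 + 1)) = (PySem.List.len t - (k + 1)) := by ring
  rw [harg]
  rw [List.foldl_map, List.foldl_map]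
  apply PySem.List.foldl_congr_mem
  intro acc j _
  have h1 : PySem.List.pyGetD (x :: t) (k + 1) "" = PySem.List.pyGetD t k "" :=
    pvGetD_cons x t "" k hk
  have h2 : PySem.List.pyGetD (x :: t) (k + 1 + 1 + (j : Int)) ""
      = PySem.List.pyGetD t (k + 1 + (j : Int)) "" := by
    have : (k + 1 + 1 + (j : Int)) = (k + 1 + (j : Int)) + 1 := by ring
    rw [this, pvGetD_cons x t "" _ (by positivity)]
  rw [h1, h2]

theorem pvFoldStep (match_ mismatch gap : Int) (x : String) (t : List String) (p : Int) :
    t.foldl (fun q y => ColPointStep match_ mismatch gap q x y) p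
      = p + (t.map (pvScore match_ mismatch gap x)).sum := by
  induction t generalizing p with
  | nil => simp
  | cons y t ih =>
    rw [List.foldl_cons, pvStep_eq, ih, List.map_cons, List.sum_cons]
    ring

theorem pvInner_head (match_ mismatch gap : Int) (x : String) (t : List String) (p : Int) :
    ColPointInner match_ mismatch gap (x :: t) p 0
      = p + (t.map (pvScore match_ mismatch gap x)).sum := by
  unfold ColPointInner
  rw [PySem.List.pyGetD_zero_cons]
  have h0 : (0 : Int) + 1 = 1 := by ring
  rw [h0]
  rw [PySem.List.foldl_pyRange_pyGetD (xs := x :: t) (a := 1) (d := "")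
    (f := fun q y => ColPointStep match_ mismatch gap q x y) (init := p) (by norm_num)]
  have hdrop : (x :: t).drop (1 : Int).toNat = t := rfl
  rw [hdrop]
  exact pvFoldStep match_ mismatch gap x t p

theorem pvOuter_shift (match_ mismatch gap p : Int) (x : String) (t : List String) :
    (PySem.List.pyRange 1 (PySem.List.len (x :: t)) 1).foldl
        (ColPointInner match_ mismatch gap (x :: t)) p
      = (PySem.List.pyRange 0 (PySem.List.len t) 1).foldl
        (ColPointInner match_ mismatch gap t) p := by
  have hlen : PySem.List.len (x :: t) = PySem.List.len t + 1 := by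
    simp [PySem.List.len_eq]
  rw [hlen, PySem.List.pyRange_one, PySem.List.pyRange_one]
  have harg : (PySem.List.len t + 1 - 1) = (PySem.List.len t - 0) := by ring
  rw [harg, List.foldl_map, List.foldl_map]
  apply PySem.List.foldl_congr_mem
  intro acc k _
  have h1 : (1 : Int) + (k : Int) = ((k : Int)) + 1 := by ring
  have h2 : (0 : Int) + (k : Int) = (k : Int) := by ring
  rw [h1, h2, pvInner_shift _ _ _ _ _ _ _ (by positivity)]

theorem pvA_fold (match_ mismatch gap : Int) (col : List String) :
    ∀ p : Int, (PySem.List.pyRange 0 (PySem.List.len col) 1).foldl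
        (ColPointInner match_ mismatch gap col) p = p + pvPair match_ mismatch gap col := by
  induction col with
  | nil =>
    intro p
    rw [PySem.List.pyRange_one_eq_nil (by simp [PySem.List.len_eq])]
    simp [pvPair]
  | cons x t ih =>
    intro p
    have hpos : (0 : Int) < PySem.List.len (x :: t) := by
      simp [PySem.List.len_eq]
    rw [PySem.List.pyRange_one_cons hpos, List.foldl_cons]
    have h01 : (0 : Int) + 1 = 1 := by ring
    rw [h01]
    show (PySem.List.pyRange 1 (PySem.List.len (x :: t)) 1).foldl
        (ColPointInner match_ mismatch gap (x :: t))
        (ColPointInner match_ mismatch gap (x :: t) p 0) = _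
    rw [pvInner_head, pvOuter_shift, ih]
    show _ = p + ((t.map (pvScore match_ mismatch gap x)).sum + pvPair match_ mismatch gap t)
    ring

theorem pvRow_gap (match_ mismatch gap : Int) (t : List String) :
    (t.map (pvScore match_ mismatch gap "-")).sum
      = gap * ((t.length : Int) - (t.count "-" : Int)) := by
  induction t with
  | nil => simp
  | cons y t ih =>
    rw [List.map_cons, List.sum_cons, ih, List.length_cons]
    by_cases hy : y = "-"
    · rw [show pvScore match_ mismatch gap "-" y = 0 by simp [pvScore, hy]]
      rw [show ((y :: t).count "-") = t.count "-" + 1 by simp [List.count_cons, hy]]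
      push_cast; ring
    · rw [show pvScore match_ mismatch gap "-" y = gap by simp [pvScore, hy]]
      rw [show ((y :: t).count "-") = t.count "-" by simp [List.count_cons, hy]]
      push_cast; ring

theorem pvRow_nongap (match_ mismatch gap : Int) (x : String) (hx : x ≠ "-") (t : List String) :
    (t.map (pvScore match_ mismatch gap x)).sum
      = gap * (t.count "-" : Int) + match_ * (t.count x : Int)
        + mismatch * ((t.length : Int) - (t.count "-" : Int) - (t.count x : Int)) := by
  induction t with
  | nil => simp
  | cons y t ih =>
    rw [List.map_cons, List.sum_cons, ih, List.length_cons]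
    by_cases hy : y = "-"
    · subst hy
      have hyx : ("-" : String) ≠ x := Ne.symm hx
      rw [show pvScore match_ mismatch gap x "-" = gap by simp [pvScore, hx]]
      rw [show (("-" :: t).count "-") = t.count "-" + 1 by simp]
      rw [show (("-" :: t).count x) = t.count x by simp [List.count_cons, hyx]]
      push_cast; ring
    · by_cases hxy : x = y
      · subst hxy
        rw [show pvScore match_ mismatch gap x x = match_ by simp [pvScore, hx]]
        rw [show ((x :: t).count "-") = t.count "-" by simp [List.count_cons, hx]]
        rw [show ((x :: t).count x) = t.count x + 1 by simp]
        push_cast; ring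
      · have hyne : y ≠ x := fun h => hxy h.symm
        rw [show pvScore match_ mismatch gap x y = mismatch by simp [pvScore, hy, hx, hxy]]
        rw [show ((y :: t).count "-") = t.count "-" by simp [List.count_cons, hy]]
        rw [show ((y :: t).count x) = t.count x by simp [List.count_cons, hyne]]
        push_cast; ring

theorem pvChoose2_succ (c : Int) : pvChoose2 (c + 1) = pvChoose2 c + c := by
  obtain ⟨k, hk⟩ := Int.even_mul_succ_self (c - 1)
  have h1 : c * (c - 1) = 2 * k := by nlinarith [hk]
  have h2 : (c + 1) * c = 2 * (k + c) := by nlinarith [hk]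
  unfold pvChoose2
  rw [show (c + 1 - 1) = c by ring, h1, h2,
    Int.mul_ediv_cancel_left _ (by norm_num), Int.mul_ediv_cancel_left _ (by norm_num)]

theorem pvPair_closed (match_ mismatch gap : Int) (col : List String) :
    pvPair match_ mismatch gap col
      = gap * (col.count "-" : Int) * ((col.length : Int) - (col.count "-" : Int))
        + match_ * pvS col
        + mismatch * (pvChoose2 ((col.length : Int) - (col.count "-" : Int)) - pvS col) := by
  induction col with
  | nil => simp [pvPair, pvS, pvChoose2]
  | cons x t ih =>
    by_cases hx : x = "-"
    · subst hx
      rw [show pvPair match_ mismatch gap ("-" :: t)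
          = (t.map (pvScore match_ mismatch gap "-")).sum + pvPair match_ mismatch gap t from rfl]
      rw [pvRow_gap, ih]
      have hc : (("-" :: t).count "-" : Int) = (t.count "-" : Int) + 1 := by
        simp [List.count_cons]
      have hl : ((("-" :: t).length : Int)) = (t.length : Int) + 1 := by push_cast [List.length_cons]; ring
      have hs : pvS ("-" :: t) = pvS t := by simp [pvS]
      rw [hc, hl, hs]
      have hng : ((t.length : Int) + 1 - ((t.count "-" : Int) + 1)) = ((t.length : Int) - (t.count "-" : Int)) := by ring
      rw [hng]
      ring
    · rw [show pvPair match_ mismatch gap (x :: t)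
          = (t.map (pvScore match_ mismatch gap x)).sum + pvPair match_ mismatch gap t from rfl]
      rw [pvRow_nongap match_ mismatch gap x hx, ih]
      have hc : (((x :: t)).count "-" : Int) = (t.count "-" : Int) := by
        simp [List.count_cons, hx]
      have hl : (((x :: t)).length : Int) = (t.length : Int) + 1 := by push_cast [List.length_cons]; ring
      have hs : pvS (x :: t) = (t.count x : Int) + pvS t := by simp [pvS, hx]
      rw [hc, hl, hs]
      have hng : ((t.length : Int) + 1 - (t.count "-" : Int)) = (((t.length : Int) - (t.count "-" : Int)) + 1) := by ring
      rw [hng, pvChoose2_succ]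
      ring

-- Σ_{y ∈ t, y ≠ '-'} (count y (x::s) - 1) in terms of counts in s
theorem pvSum_shift (x : String) (s t : List String) :
    (t.map (fun y => if y = "-" then 0 else ((x :: s).count y : Int) - 1)).sum
      = (t.map (fun y => if y = "-" then 0 else ((s.count y : Int) - 1))).sum
        + (if x = "-" then 0 else (t.count x : Int)) := by
  induction t with
  | nil => simp
  | cons y t ih =>
    rw [List.map_cons, List.sum_cons, List.map_cons, List.sum_cons, ih]
    by_cases hy : y = "-"
    · simp only [if_pos hy]
      by_cases hx : x = "-"
      · simp only [if_pos hx]; ring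
      · have hyx : y ≠ x := by rw [hy]; exact Ne.symm hx
        rw [show ((y :: t).count x) = t.count x by simp [List.count_cons, hyx]]
        simp only [if_neg hx]; ring
    · simp only [if_neg hy]
      by_cases hxy : x = y
      · subst hxy
        have hx : x ≠ "-" := hy
        rw [show ((x :: s).count x) = s.count x + 1 by simp]
        rw [show ((x :: t).count x) = t.count x + 1 by simp]
        simp only [if_neg hx]
        push_cast; ring
      · have hyx : y ≠ x := fun h => hxy h.symm
        rw [show ((x :: s).count y) = s.count y by simp [List.count_cons, hxy]]
        rw [show ((y :: t).count x) = t.count x by simp [List.count_cons, hyx]]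
        by_cases hx : x = "-"
        · simp only [if_pos hx]; ring
        · simp only [if_neg hx]; ring

theorem pvSum_full (col : List String) :
    (col.map (fun y => if y = "-" then 0 else ((col.count y : Int) - 1))).sum
      = 2 * pvS col := by
  induction col with
  | nil => simp [pvS]
  | cons x t ih =>
    rw [List.map_cons, List.sum_cons, pvSum_shift x t t, ih]
    by_cases hx : x = "-"
    · simp only [if_pos hx]
      rw [show pvS (x :: t) = pvS t by simp [pvS, hx]]
      ring
    · simp only [if_neg hx]
      rw [show ((x :: t).count x) = t.count x + 1 by simp]
      rw [show pvS (x :: t) = (t.count x : Int) + pvS t by simp [pvS, hx]]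
      push_cast; ring

theorem pvFoldIf (col : List String) (l : List String) :
    ∀ a : Int, l.foldl (fun acc x => if x ≠ "-" then acc + ((col.count x : Int) - 1) else acc) a
      = a + (l.map (fun y => if y = "-" then 0 else ((col.count y : Int) - 1))).sum := by
  induction l with
  | nil => intro a; simp
  | cons y l ih =>
    intro a
    rw [List.foldl_cons, List.map_cons, List.sum_cons]
    by_cases hy : y = "-"
    · rw [if_neg (by simp [hy]), if_pos hy, ih]; ring
    · rw [if_pos hy, if_neg hy, ih]; ring

theorem pvAlt_closed (col : List String) (match_ mismatch gap : Int) :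
    ColPoint_alt col match_ mismatch gap
      = gap * (col.count "-" : Int) * ((col.length : Int) - (col.count "-" : Int))
        + match_ * pvS col
        + mismatch * (pvChoose2 ((col.length : Int) - (col.count "-" : Int)) - pvS col) := by
  unfold ColPoint_alt
  simp only [PySem.Dict.getD_counter, PySem.List.len_eq]
  rw [pvFoldIf col col 0, pvSum_full]
  rw [PySem.Int.floordiv_eq_ediv_of_pos (by norm_num),
    PySem.Int.floordiv_eq_ediv_of_pos (by norm_num)]
  rw [show ((0 : Int) + 2 * pvS col) = 2 * pvS col by ring,
    Int.mul_ediv_cancel_left _ (by norm_num)]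
  rfl

-- ===== VERDICT (by name: the statement is the Claim_ definition above) =====
theorem ColPoint_spec : Claim_equal_ColPoint := by
  intro col match_ mismatch gap _
  unfold Spec_ColPoint
  unfold ColPoint
  rw [pvA_fold, pvAlt_closed, pvPair_closed]
  ring
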